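-- pv_equiv track=rewrite | github.com/lauren2chow/concord4 | concord4.py | __get_input_stdin
-- ===== SOURCE A (Python) =====
-- def __get_input_stdin(input):
--     """
--     The private function __get_input_stdin creates two arrays, exclude_arr
--         and index_arr which contains all the exlude words and index lines
--         from the input given
--     Parameters: self
--                 input - the lines from txt file given or from stdin as an
--                     array
--     Returns: two arrays, the exclude_arr and index_arr
--     """
--     exclude_arr = []
--     index_arr = []
--     exclude_count = 0
--     in_index_arr = False
--     for line in input:
--         exclude_count = exclude_count + 1
--         line_strip = line.strip()
--
--         if line_strip == "\"\"\"\"":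
--             in_index_arr = True
--         elif in_index_arr:
--             index_arr.append(line_strip)
--         elif exclude_count > 2:
--             exclude_arr.append(line_strip.lower())
--
--     return exclude_arr, index_arr
-- ===== SOURCE B (Python) =====
-- def __get_input_stdin(input):
--     lines = list(input)
--     marker = '""""'
--     stripped = [l.strip() for l in lines]
--     try:
--         k = stripped.index(marker)
--     except ValueError:
--         k = len(lines)
--     exclude_arr = [s.lower() for s in stripped[2:k]]
--     index_arr = [s for s in stripped[k + 1:] if s != marker]
--     return exclude_arr, index_arr
-- ===== Notes on version B (the rewrite author's own statement) =====
-- stated objective: simpler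
-- what changed: Replaces the stateful single loop (counter + in_index_arr flag) by find-the-first-marker-index then two slice comprehensions, with a filter dropping later marker lines.
import Mathlib
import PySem

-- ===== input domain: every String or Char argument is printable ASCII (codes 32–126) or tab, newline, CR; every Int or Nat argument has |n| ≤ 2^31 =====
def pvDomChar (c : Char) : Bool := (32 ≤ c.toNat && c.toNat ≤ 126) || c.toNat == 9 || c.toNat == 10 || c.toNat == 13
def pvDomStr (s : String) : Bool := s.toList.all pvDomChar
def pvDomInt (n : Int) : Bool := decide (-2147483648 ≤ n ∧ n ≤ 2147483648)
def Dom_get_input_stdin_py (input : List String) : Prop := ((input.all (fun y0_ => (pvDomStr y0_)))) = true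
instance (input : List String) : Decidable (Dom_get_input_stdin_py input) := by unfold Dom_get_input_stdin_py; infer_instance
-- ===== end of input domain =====

-- B replaces A's stateful single loop (counter + flag) by locating the first marker line and
-- building the two arrays from slices; objective: simpler.


-- ===== PORT A =====
-- loop state: (exclude_arr, index_arr, exclude_count, in_index_arr)
def get_input_stdin_py_step (st : List String × List String × Int × Bool) (line : String) :
    List String × List String × Int × Bool :=
  let ex := st.1; let ix := st.2.1; let c := st.2.2.1 + 1; let f := st.2.2.2
  let ls := PySem.Str.strip line
  if ls = "\"\"\"\"" then (ex, ix, c, true)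
  else if f then (ex, ix ++ [ls], c, f)
  else if c > 2 then (ex ++ [PySem.Str.lower ls], ix, c, f)
  else (ex, ix, c, f)

def get_input_stdin_py (input : List String) : List String × List String :=
  let r := input.foldl get_input_stdin_py_step ([], [], 0, false)
  (r.1, r.2.1)

-- ===== PORT B =====
def get_input_stdin_py_alt (input : List String) : List String × List String :=
  let stripped := input.map PySem.Str.strip
  let k : Nat :=
    match PySem.List.index? stripped "\"\"\"\"" with
    | some i => i
    | none => input.length
  let exclude_arr := (PySem.List.slice stripped (some 2) (some (k : Int))).map PySem.Str.lower
  let index_arr := (PySem.List.slice stripped (some ((k : Int) + 1)) none).filter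
      (fun s => s ≠ "\"\"\"\"")
  (exclude_arr, index_arr)

-- ===== PRECONDITION & SPEC =====
def Spec_get_input_stdin_py (input : List String) (out : List String × List String) : Prop := out = get_input_stdin_py_alt input
instance (input : List String) (out : List String × List String) : Decidable (Spec_get_input_stdin_py input out) := by unfold Spec_get_input_stdin_py; infer_instance

-- ===== CLAIM (what is proved, stated in full; the proofs are below) =====
def Claim_equal_get_input_stdin_py : Prop := ∀ (input : List String), Dom_get_input_stdin_py input → Spec_get_input_stdin_py input (get_input_stdin_py input)

-- ===== LEMMAS AND PROOFS =====

-- After the flag is set, A only appends stripped non-marker lines to index_arr.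
theorem fold_flag_true (l : List String) (ex ix : List String) (c : Int) :
    l.foldl get_input_stdin_py_step (ex, ix, c, true) =
      (ex, ix ++ (l.map PySem.Str.strip).filter (fun s => s ≠ "\"\"\"\""),
        c + l.length, true) := by
  induction l generalizing ix c with
  | nil => simp
  | cons h t ih =>
    simp only [List.foldl_cons, get_input_stdin_py_step, List.map_cons, List.filter_cons]
    by_cases hm : PySem.Str.strip h = "\"\"\"\""
    · simp [hm, ih]; omega
    · simp [hm, ih]; omega

-- Before any marker line, A appends lowered stripped lines once the counter exceeds 2.
theorem fold_flag_false (l : List String) (ex ix : List String) (c : Int) :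
    "\"\"\"\"" ∉ l.map PySem.Str.strip →
    l.foldl get_input_stdin_py_step (ex, ix, c, false) =
      (ex ++ ((l.map PySem.Str.strip).drop (2 - c).toNat).map PySem.Str.lower,
        ix, c + l.length, false) := by
  induction l generalizing ex c with
  | nil => intro _; simp
  | cons h t ih =>
    intro hnm
    simp only [List.map_cons, List.mem_cons, not_or] at hnm
    simp only [List.foldl_cons, get_input_stdin_py_step]
    rw [if_neg (by exact fun he => hnm.1 he.symm)]
    simp only [if_neg (by simp : ¬ (false = true))] at *
    by_cases hc : c + 1 > 2
    · rw [if_pos hc, ih _ _ hnm.2]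
      have h2 : (2 - c).toNat = 0 := by omega
      have h3 : (2 - (c + 1)).toNat = 0 := by omega
      simp [h2, h3]; omega
    · rw [if_neg hc, ih _ _ hnm.2]
      have h2 : (2 - c).toNat = (2 - (c + 1)).toNat + 1 := by omega
      simp [h2]; omega

-- ===== VERDICT (by name: the statement is the Claim_ definition above) =====
theorem get_input_stdin_py_spec : Claim_equal_get_input_stdin_py := by
  intro input _
  unfold Spec_get_input_stdin_py get_input_stdin_py get_input_stdin_py_alt
  rcases hidx : PySem.List.index? (input.map PySem.Str.strip) "\"\"\"\"" with _ | k
  · -- no marker anywhere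
    have hnm : "\"\"\"\"" ∉ input.map PySem.Str.strip :=
      (PySem.List.index?_eq_none_iff _ _).mp hidx
    rw [fold_flag_false input [] [] 0 hnm]
    have hlen : (input.map PySem.Str.strip).length = input.length := by simp
    simp only [hidx, Prod.mk.injEq]
    refine ⟨?_, ?_⟩
    · have hslice : PySem.List.slice (input.map PySem.Str.strip) (some 2)
          (some ((input.length : Nat) : Int)) = (input.map PySem.Str.strip).drop 2 := by
        show PySem.List.slice _ (some ((2:Nat):Int)) (some ((input.length : Nat) : Int)) = _
        rw [PySem.List.slice_natCast]
        exact List.take_of_length_le (by simp)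
      rw [hslice, (rfl : ((2:Int) - 0).toNat = 2)]
      simp
    · have h1 : PySem.List.slice (input.map PySem.Str.strip)
          (some (((input.length : Nat) : Int) + 1)) none =
          (input.map PySem.Str.strip).drop (input.length + 1) := by
        have := PySem.List.slice_from_natCast (input.map PySem.Str.strip) (input.length + 1)
        push_cast at this ⊢
        exact this
      rw [h1, List.drop_of_length_le (by omega)]
      simp
  · -- marker at index k: split input into pre ++ m :: post
    obtain ⟨pre', suf', hsplit, hklen, hnotpre⟩ :=
      (PySem.List.index?_eq_some_iff _ _ _).mp hidx
    obtain ⟨pre, rest, hinput, hpre, hrest⟩ := List.map_eq_append_iff.mp hsplit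
    rcases rest with _ | ⟨m, post⟩
    · simp at hrest
    simp only [List.map_cons, List.cons.injEq] at hrest
    obtain ⟨hm, hpost⟩ := hrest
    subst hinput
    have hprelen : pre.length = k := by
      have := congrArg List.length hpre; simpa using this.trans hklen
    have hnm : "\"\"\"\"" ∉ pre.map PySem.Str.strip := by rw [hpre]; exact hnotpre
    -- evaluate A
    rw [List.foldl_append, fold_flag_false pre [] [] 0 hnm, List.foldl_cons]
    simp only [get_input_stdin_py_step]
    rw [if_pos hm, fold_flag_true]
    -- evaluate B
    simp only [hidx]
    have hmap : (pre ++ m :: post).map PySem.Str.strip =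
        pre.map PySem.Str.strip ++ "\"\"\"\"" :: post.map PySem.Str.strip := by
      simp [hm]
    rw [hmap]
    have hplen : (pre.map PySem.Str.strip).length = k := by simp [hprelen]
    simp only [Prod.mk.injEq]
    refine ⟨?_, ?_⟩
    · -- exclude component
      have hslice : PySem.List.slice
          (pre.map PySem.Str.strip ++ "\"\"\"\"" :: post.map PySem.Str.strip) (some 2)
          (some ((k : Nat) : Int)) = (pre.map PySem.Str.strip).drop 2 := by
        show PySem.List.slice _ (some ((2:Nat):Int)) (some ((k : Nat) : Int)) = _
        rw [PySem.List.slice_natCast]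
        by_cases h2 : 2 ≤ k
        · rw [List.drop_append_of_le_length (by omega),
            List.take_append_of_le_length (by simp [hplen]),
            List.take_of_length_le (by simp [hplen])]
        · have hk2 : k - 2 = 0 := by omega
          have hd : (pre.map PySem.Str.strip).drop 2 = [] :=
            List.drop_eq_nil_of_le (by omega)
          rw [List.drop_append, hd, hk2]
          simp
      rw [hslice, (rfl : ((2:Int) - 0).toNat = 2)]
      simp
    · -- index component
      have h1 : PySem.List.slice
          (pre.map PySem.Str.strip ++ "\"\"\"\"" :: post.map PySem.Str.strip)
          (some (((k : Nat) : Int) + 1)) none =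
          (pre.map PySem.Str.strip ++ "\"\"\"\"" :: post.map PySem.Str.strip).drop (k + 1) := by
        have := PySem.List.slice_from_natCast
          (pre.map PySem.Str.strip ++ "\"\"\"\"" :: post.map PySem.Str.strip) (k + 1)
        push_cast at this ⊢
        exact this
      rw [h1, List.drop_append, hplen,
        List.drop_eq_nil_of_le (by omega)]
      simp
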